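-- pv_equiv track=rewrite | github.com/manarone/AgenticAI | src/libs/common/shell_policy.py | _unwrap_prefixed_command
-- ===== SOURCE A (Python) =====
-- _SUDO_OPTIONS_WITH_VALUE = {
--     '-u',
--     '--user',
--     '-g',
--     '--group',
--     '-h',
--     '--host',
--     '-p',
--     '--prompt',
--     '-C',
--     '--close-from',
--     '-T',
--     '--command-timeout',
--     '-t',
--     '--type',
--     '-r',
--     '--role',
-- }
--
-- def _command_name(token: str) -> str:
--     stripped = (token or '').strip()
--     if not stripped:
--         return ''
--     if '/' in stripped:
--         stripped = stripped.rstrip('/').rsplit('/', 1)[-1]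
--     return stripped.lower()
--
-- def _env_subcommand(parts: list[str] | None) -> list[str]:
--     if not parts or _command_name(parts[0]) != 'env':
--         return []
--
--     i = 1
--     while i < len(parts):
--         token = parts[i]
--         lowered = token.lower()
--
--         if token == '--':
--             i += 1
--             break
--
--         if lowered in {'-u', '--unset', '-c', '--chdir', '-s', '--split-string'}:
--             i += 2
--             continue
--
--         if token.startswith('-'):
--             i += 1
--             continue
--
--         if '=' in token and not token.startswith('='):
--             i += 1
--             continue
--
--         break
--
--     return parts[i:] if i < len(parts) else []
--
-- def _sudo_subcommand(parts: list[str] | None) -> list[str]: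
--     if not parts or _command_name(parts[0]) != 'sudo':
--         return []
--
--     i = 1
--     while i < len(parts):
--         token = parts[i]
--         lowered = token.lower()
--
--         if token == '--':
--             i += 1
--             break
--
--         if lowered in _SUDO_OPTIONS_WITH_VALUE:
--             i += 2
--             continue
--
--         if token.startswith('-'):
--             i += 1
--             continue
--
--         break
--
--     return parts[i:] if i < len(parts) else []
--
-- def _unwrap_prefixed_command(parts: list[str] | None) -> list[str]:
--     current = parts or []
--     while current:
--         first = _command_name(current[0])
--         if first == 'env':
--             unwrapped = _env_subcommand(current)
--             if not unwrapped:
--                 return current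
--             current = unwrapped
--             continue
--         if first == 'sudo':
--             unwrapped = _sudo_subcommand(current)
--             if not unwrapped:
--                 return current
--             current = unwrapped
--             continue
--         return current
--     return current
-- ===== SOURCE B (Python) =====
-- _SUDO_OPTIONS_WITH_VALUE = {
--     '-u', '--user', '-g', '--group', '-h', '--host', '-p', '--prompt',
--     '-C', '--close-from', '-T', '--command-timeout', '-t', '--type',
--     '-r', '--role',
-- }
--
-- _ENV_OPTIONS_WITH_VALUE = {'-u', '--unset', '-c', '--chdir', '-s', '--split-string'}
--
--
-- def _command_name(token: str) -> str:
--     stripped = (token or '').strip()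
--     if not stripped:
--         return ''
--     if '/' in stripped:
--         stripped = stripped.rstrip('/').rsplit('/', 1)[-1]
--     return stripped.lower()
--
--
-- def _unwrap_prefixed_command(parts: list[str] | None) -> list[str]:
--     # Single flat left-to-right state-machine pass: no nested loops, no helper
--     # scanners, no intermediate slices.  `wrapper` is the state (None = the next
--     # token sits in command position; 'env'/'sudo' = we are inside that
--     # wrapper's option region), `start` remembers where the current command
--     # segment began so that a wrapper whose options swallow the rest of the
--     # list is returned whole.
--     tokens = parts or []
--     n = len(tokens)
--     i = 0
--     start = 0
--     wrapper = None
--     while i < n: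
--         tok = tokens[i]
--         if wrapper is None:
--             name = _command_name(tok)
--             if name != 'env' and name != 'sudo':
--                 return tokens[i:]
--             wrapper = name
--             start = i
--             i += 1
--         elif tok == '--':
--             wrapper = None
--             i += 1
--         elif tok.lower() in (_ENV_OPTIONS_WITH_VALUE if wrapper == 'env'
--                              else _SUDO_OPTIONS_WITH_VALUE):
--             i += 2
--         elif tok.startswith('-'):
--             i += 1
--         elif wrapper == 'env' and '=' in tok and not tok.startswith('='):
--             i += 1
--         else:
--             wrapper = None
--     return tokens[start:]
-- ===== Notes on version B (the rewrite author's own statement) =====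
-- stated objective: alternative
-- what changed: Replaced A's outer slice-and-restart loop with its two per-wrapper scanning helpers by one flat left-to-right state-machine pass: a single loop with a mode variable (command position vs. inside env/sudo options) and a segment-start marker, no nested loops and no intermediate list slices.
import Mathlib
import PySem

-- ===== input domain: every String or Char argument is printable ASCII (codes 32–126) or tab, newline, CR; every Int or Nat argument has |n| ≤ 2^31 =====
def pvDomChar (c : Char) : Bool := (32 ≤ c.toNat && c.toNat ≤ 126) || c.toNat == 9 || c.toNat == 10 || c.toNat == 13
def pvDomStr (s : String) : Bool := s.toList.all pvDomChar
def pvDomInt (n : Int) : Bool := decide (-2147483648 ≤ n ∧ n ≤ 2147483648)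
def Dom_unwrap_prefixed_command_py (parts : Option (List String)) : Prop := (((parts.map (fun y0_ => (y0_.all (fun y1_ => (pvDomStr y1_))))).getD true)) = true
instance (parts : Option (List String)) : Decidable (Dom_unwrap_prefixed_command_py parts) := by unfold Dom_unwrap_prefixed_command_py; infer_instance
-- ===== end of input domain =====

-- B replaces A's outer slice-and-restart loop with its two scanning helpers by one flat
-- left-to-right state-machine pass over the token list (objective: alternative, same cost);
-- return value only, no mutation in either.

-- Shared module constants / helper (identical in both Python sources)
def sudoOptionsWithValue : PySem.Set String := PySem.Set.ofList
  ["-u", "--user", "-g", "--group", "-h", "--host", "-p", "--prompt",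
   "-C", "--close-from", "-T", "--command-timeout", "-t", "--type", "-r", "--role"]

def envOptionsWithValue : PySem.Set String := PySem.Set.ofList
  ["-u", "--unset", "-c", "--chdir", "-s", "--split-string"]

-- _command_name; rstrip('/') and rsplit('/',1)[-1] ported by hand on List Char (exact:
-- rstrip drops trailing '/', rsplit-last keeps the suffix after the last remaining '/')
def cmdName (token : String) : String :=
  let stripped := PySem.Str.strip token   -- (token or '').strip(): '' strips to '' either way
  if stripped == "" then ""
  else
    let base :=
      if PySem.Str.isIn "/" stripped then
        let r := stripped.toList.reverse.dropWhile (· == '/')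
        String.ofList (r.takeWhile (· ≠ '/')).reverse
      else stripped
    PySem.Str.lower base

-- ===== PORT A =====
def envLoopA (parts : List String) (i : Nat) : Nat :=
  if h : i < parts.length then
    if parts[i] == "--" then i + 1
    else if envOptionsWithValue.contains (PySem.Str.lower parts[i]) then envLoopA parts (i + 2)
    else if PySem.Str.startswith parts[i] "-" then envLoopA parts (i + 1)
    else if PySem.Str.isIn "=" parts[i] && !PySem.Str.startswith parts[i] "=" then envLoopA parts (i + 1)
    else i
  else i
termination_by parts.length - i

def sudoLoopA (parts : List String) (i : Nat) : Nat :=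
  if h : i < parts.length then
    if parts[i] == "--" then i + 1
    else if sudoOptionsWithValue.contains (PySem.Str.lower parts[i]) then sudoLoopA parts (i + 2)
    else if PySem.Str.startswith parts[i] "-" then sudoLoopA parts (i + 1)
    else i
  else i
termination_by parts.length - i

def envSubA (parts : List String) : List String :=
  match parts with
  | [] => []
  | p0 :: _ =>
    if cmdName p0 != "env" then []
    else if envLoopA parts 1 < parts.length then parts.drop (envLoopA parts 1) else []

def sudoSubA (parts : List String) : List String :=
  match parts with
  | [] => []
  | p0 :: _ =>
    if cmdName p0 != "sudo" then []
    else if sudoLoopA parts 1 < parts.length then parts.drop (sudoLoopA parts 1) else []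

theorem envLoopA_le (parts : List String) (i : Nat) : i ≤ envLoopA parts i := by
  fun_induction envLoopA parts i <;> omega

theorem sudoLoopA_le (parts : List String) (i : Nat) : i ≤ sudoLoopA parts i := by
  fun_induction sudoLoopA parts i <;> omega

theorem envSubA_length_lt (parts : List String) (h : envSubA parts ≠ []) :
    (envSubA parts).length < parts.length := by
  match parts with
  | [] => simp [envSubA] at h
  | p0 :: rest =>
    have hle := envLoopA_le (p0 :: rest) 1
    simp only [envSubA] at h ⊢
    by_cases h1 : (cmdName p0 != "env") = true
    · rw [if_pos h1] at h; exact absurd rfl h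
    · rw [if_neg h1] at h ⊢
      by_cases h2 : envLoopA (p0 :: rest) 1 < (p0 :: rest).length
      · rw [if_pos h2] at h ⊢; simp only [List.length_drop]; omega
      · rw [if_neg h2] at h; exact absurd rfl h

theorem sudoSubA_length_lt (parts : List String) (h : sudoSubA parts ≠ []) :
    (sudoSubA parts).length < parts.length := by
  match parts with
  | [] => simp [sudoSubA] at h
  | p0 :: rest =>
    have hle := sudoLoopA_le (p0 :: rest) 1
    simp only [sudoSubA] at h ⊢
    by_cases h1 : (cmdName p0 != "sudo") = true
    · rw [if_pos h1] at h; exact absurd rfl h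
    · rw [if_neg h1] at h ⊢
      by_cases h2 : sudoLoopA (p0 :: rest) 1 < (p0 :: rest).length
      · rw [if_pos h2] at h ⊢; simp only [List.length_drop]; omega
      · rw [if_neg h2] at h; exact absurd rfl h

def unwrapLoopA (current : List String) : List String :=
  if h : current = [] then current
  else if cmdName (current.head h) == "env" then
    if _hu : envSubA current = [] then current else unwrapLoopA (envSubA current)
  else if cmdName (current.head h) == "sudo" then
    if _hu : sudoSubA current = [] then current else unwrapLoopA (sudoSubA current)
  else current
termination_by current.length
decreasing_by
  · exact envSubA_length_lt current _hu
  · exact sudoSubA_length_lt current _hu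

def unwrap_prefixed_command_py (parts : Option (List String)) : List String :=
  unwrapLoopA (parts.getD [])   -- 'parts or []': None and [] both give []

-- ===== PORT B =====
-- one flat pass; wrapper = none: command position, some w: inside w's option region;
-- start: where the current command segment began (returned whole if the options
-- swallow the rest of the list)
def stateLoopB (tokens : List String) (i start : Nat) (wrapper : Option String) : List String :=
  if h : i < tokens.length then
    let tok := tokens[i]
    match wrapper with
    | none =>
      let name := cmdName tok
      if name != "env" && name != "sudo" then tokens.drop i
      else stateLoopB tokens (i + 1) i (some name)
    | some w =>
      if tok == "--" then stateLoopB tokens (i + 1) start none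
      else if (if w == "env" then envOptionsWithValue else sudoOptionsWithValue).contains
          (PySem.Str.lower tok) then stateLoopB tokens (i + 2) start wrapper
      else if PySem.Str.startswith tok "-" then stateLoopB tokens (i + 1) start wrapper
      else if w == "env" && PySem.Str.isIn "=" tok && !PySem.Str.startswith tok "=" then
        stateLoopB tokens (i + 1) start wrapper
      else stateLoopB tokens i start none
  else tokens.drop start
termination_by (tokens.length - i, if wrapper.isSome then 1 else 0)
decreasing_by all_goals (simp_all; omega)

def unwrap_prefixed_command_py_alt (parts : Option (List String)) : List String :=
  stateLoopB (parts.getD []) 0 0 none   -- 'parts or []': None and [] both give []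

-- ===== PRECONDITION & SPEC =====
def Spec_unwrap_prefixed_command_py (parts : Option (List String)) (out : List String) : Prop := out = unwrap_prefixed_command_py_alt parts
instance (parts : Option (List String)) (out : List String) : Decidable (Spec_unwrap_prefixed_command_py parts out) := by unfold Spec_unwrap_prefixed_command_py; infer_instance

-- ===== CLAIM (what is proved, stated in full; the proofs are below) =====
def Claim_equal_unwrap_prefixed_command_py : Prop := ∀ (parts : Option (List String)), Dom_unwrap_prefixed_command_py parts → Spec_unwrap_prefixed_command_py parts (unwrap_prefixed_command_py parts)

-- ===== LEMMAS AND PROOFS =====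
theorem stateLoopB_none_lt (tokens : List String) (i s : Nat) (h : i < tokens.length) :
    stateLoopB tokens i s none =
      if cmdName tokens[i] = "env" then stateLoopB tokens (i + 1) i (some "env")
      else if cmdName tokens[i] = "sudo" then stateLoopB tokens (i + 1) i (some "sudo")
      else tokens.drop i := by
  rw [stateLoopB]
  by_cases he : cmdName tokens[i] = "env"
  · simp [h, he]
  · by_cases hs : cmdName tokens[i] = "sudo"
    · simp [h, hs]
    · simp [h, he, hs]

theorem stateLoopB_env (tokens : List String) (start : Nat) (i : Nat) :
    stateLoopB tokens i start (some "env") =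
      if envLoopA tokens i < tokens.length
      then stateLoopB tokens (envLoopA tokens i) start none
      else tokens.drop start := by
  fun_induction envLoopA tokens i with
  | case1 i h hdash =>
    rw [stateLoopB]
    simp only [dif_pos h]
    rw [if_pos hdash]
    by_cases h2 : i + 1 < tokens.length
    · rw [if_pos h2]
    · rw [if_neg h2, stateLoopB, dif_neg h2]
  | case2 i h hdash hopt ih =>
    rw [stateLoopB]
    simp only [dif_pos h]
    rw [if_neg (by simpa using hdash),
        show (if (("env":String) == "env") = true then envOptionsWithValue else sudoOptionsWithValue) = envOptionsWithValue from rfl,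
        if_pos hopt]
    exact ih
  | case3 i h hdash hopt hstart ih =>
    rw [stateLoopB]
    simp only [dif_pos h]
    rw [if_neg (by simpa using hdash),
        show (if (("env":String) == "env") = true then envOptionsWithValue else sudoOptionsWithValue) = envOptionsWithValue from rfl,
        if_neg hopt, if_pos hstart]
    exact ih
  | case4 i h hdash hopt hstart heq ih =>
    rw [stateLoopB]
    simp only [dif_pos h]
    rw [if_neg (by simpa using hdash),
        show (if (("env":String) == "env") = true then envOptionsWithValue else sudoOptionsWithValue) = envOptionsWithValue from rfl,
        if_neg hopt, if_neg hstart,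
        show (("env":String) == "env") = true from rfl, Bool.true_and, if_pos heq]
    exact ih
  | case5 i h hdash hopt hstart heq =>
    rw [stateLoopB]
    simp only [dif_pos h]
    rw [if_neg (by simpa using hdash),
        show (if (("env":String) == "env") = true then envOptionsWithValue else sudoOptionsWithValue) = envOptionsWithValue from rfl,
        if_neg hopt, if_neg hstart,
        show (("env":String) == "env") = true from rfl, Bool.true_and, if_neg heq, if_pos h]
  | case6 i h => rw [stateLoopB, dif_neg h, if_neg h]

theorem stateLoopB_sudo (tokens : List String) (start : Nat) (i : Nat) :
    stateLoopB tokens i start (some "sudo") =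
      if sudoLoopA tokens i < tokens.length
      then stateLoopB tokens (sudoLoopA tokens i) start none
      else tokens.drop start := by
  fun_induction sudoLoopA tokens i with
  | case1 i h hdash =>
    rw [stateLoopB]
    simp only [dif_pos h]
    rw [if_pos hdash]
    by_cases h2 : i + 1 < tokens.length
    · rw [if_pos h2]
    · rw [if_neg h2, stateLoopB, dif_neg h2]
  | case2 i h hdash hopt ih =>
    rw [stateLoopB]
    simp only [dif_pos h]
    rw [if_neg (by simpa using hdash),
        show (if (("sudo":String) == "env") = true then envOptionsWithValue else sudoOptionsWithValue) = sudoOptionsWithValue from rfl,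
        if_pos hopt]
    exact ih
  | case3 i h hdash hopt hstart ih =>
    rw [stateLoopB]
    simp only [dif_pos h]
    rw [if_neg (by simpa using hdash),
        show (if (("sudo":String) == "env") = true then envOptionsWithValue else sudoOptionsWithValue) = sudoOptionsWithValue from rfl,
        if_neg hopt, if_pos hstart]
    exact ih
  | case4 i h hdash hopt hstart =>
    rw [stateLoopB]
    simp only [dif_pos h]
    rw [if_neg (by simpa using hdash),
        show (if (("sudo":String) == "env") = true then envOptionsWithValue else sudoOptionsWithValue) = sudoOptionsWithValue from rfl,
        if_neg hopt, if_neg hstart,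
        show (("sudo":String) == "env") = false from rfl, Bool.false_and, Bool.false_and,
        if_neg (by simp), if_pos h]
  | case5 i h => rw [stateLoopB, dif_neg h, if_neg h]
-- A's inner scans shifted: running on tokens.drop i from offset k equals running on
-- tokens from offset i + k, shifted back by i
theorem envLoopA_shift (tokens : List String) (i : Nat) (k : Nat) :
    envLoopA tokens (i + k) = i + envLoopA (tokens.drop i) k := by
  fun_induction envLoopA (tokens.drop i) k with
  | case1 k h hdash =>
    have hlen : i + k < tokens.length := by simp only [List.length_drop] at h; omega
    have he : tokens[i + k]'hlen = (tokens.drop i)[k]'h := by rw [List.getElem_drop]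
    rw [envLoopA, dif_pos hlen, he, if_pos hdash]
    omega
  | case2 k h hdash hopt ih =>
    have hlen : i + k < tokens.length := by simp only [List.length_drop] at h; omega
    have he : tokens[i + k]'hlen = (tokens.drop i)[k]'h := by rw [List.getElem_drop]
    rw [envLoopA, dif_pos hlen, he, if_neg (by simpa using hdash), if_pos hopt,
        show i + k + 2 = i + (k + 2) by omega, ih]
  | case3 k h hdash hopt hstart ih =>
    have hlen : i + k < tokens.length := by simp only [List.length_drop] at h; omega
    have he : tokens[i + k]'hlen = (tokens.drop i)[k]'h := by rw [List.getElem_drop]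
    rw [envLoopA, dif_pos hlen, he, if_neg (by simpa using hdash), if_neg hopt,
        if_pos hstart, show i + k + 1 = i + (k + 1) by omega, ih]
  | case4 k h hdash hopt hstart heq ih =>
    have hlen : i + k < tokens.length := by simp only [List.length_drop] at h; omega
    have he : tokens[i + k]'hlen = (tokens.drop i)[k]'h := by rw [List.getElem_drop]
    rw [envLoopA, dif_pos hlen, he, if_neg (by simpa using hdash), if_neg hopt,
        if_neg hstart, if_pos heq, show i + k + 1 = i + (k + 1) by omega, ih]
  | case5 k h hdash hopt hstart heq =>
    have hlen : i + k < tokens.length := by simp only [List.length_drop] at h; omega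
    have he : tokens[i + k]'hlen = (tokens.drop i)[k]'h := by rw [List.getElem_drop]
    rw [envLoopA, dif_pos hlen, he, if_neg (by simpa using hdash), if_neg hopt,
        if_neg hstart, if_neg heq]
  | case6 k h =>
    have hlen : ¬ i + k < tokens.length := by simp only [List.length_drop] at h; omega
    rw [envLoopA, dif_neg hlen]

theorem sudoLoopA_shift (tokens : List String) (i : Nat) (k : Nat) :
    sudoLoopA tokens (i + k) = i + sudoLoopA (tokens.drop i) k := by
  fun_induction sudoLoopA (tokens.drop i) k with
  | case1 k h hdash =>
    have hlen : i + k < tokens.length := by simp only [List.length_drop] at h; omega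
    have he : tokens[i + k]'hlen = (tokens.drop i)[k]'h := by rw [List.getElem_drop]
    rw [sudoLoopA, dif_pos hlen, he, if_pos hdash]
    omega
  | case2 k h hdash hopt ih =>
    have hlen : i + k < tokens.length := by simp only [List.length_drop] at h; omega
    have he : tokens[i + k]'hlen = (tokens.drop i)[k]'h := by rw [List.getElem_drop]
    rw [sudoLoopA, dif_pos hlen, he, if_neg (by simpa using hdash), if_pos hopt,
        show i + k + 2 = i + (k + 2) by omega, ih]
  | case3 k h hdash hopt hstart ih =>
    have hlen : i + k < tokens.length := by simp only [List.length_drop] at h; omega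
    have he : tokens[i + k]'hlen = (tokens.drop i)[k]'h := by rw [List.getElem_drop]
    rw [sudoLoopA, dif_pos hlen, he, if_neg (by simpa using hdash), if_neg hopt,
        if_pos hstart, show i + k + 1 = i + (k + 1) by omega, ih]
  | case4 k h hdash hopt hstart =>
    have hlen : i + k < tokens.length := by simp only [List.length_drop] at h; omega
    have he : tokens[i + k]'hlen = (tokens.drop i)[k]'h := by rw [List.getElem_drop]
    rw [sudoLoopA, dif_pos hlen, he, if_neg (by simpa using hdash), if_neg hopt,
        if_neg hstart]
  | case5 k h =>
    have hlen : ¬ i + k < tokens.length := by simp only [List.length_drop] at h; omega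
    rw [sudoLoopA, dif_neg hlen]
theorem stateLoopB_none_indep (tokens : List String) (i s s' : Nat) (h : i < tokens.length) :
    stateLoopB tokens i s none = stateLoopB tokens i s' none := by
  rw [stateLoopB_none_lt tokens i s h, stateLoopB_none_lt tokens i s' h]

theorem unwrapLoopA_cons (p0 : String) (rest : List String) :
    unwrapLoopA (p0 :: rest) =
      if cmdName p0 = "env" then
        (if envSubA (p0 :: rest) = [] then p0 :: rest else unwrapLoopA (envSubA (p0 :: rest)))
      else if cmdName p0 = "sudo" then
        (if sudoSubA (p0 :: rest) = [] then p0 :: rest else unwrapLoopA (sudoSubA (p0 :: rest)))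
      else p0 :: rest := by
  rw [unwrapLoopA]
  simp

-- main invariant: B in command position at index i computes A's unwrap of tokens.drop i
theorem stateLoopB_main (tokens : List String) :
    ∀ m i, tokens.length - i ≤ m →
      stateLoopB tokens i i none = unwrapLoopA (tokens.drop i) := by
  intro m
  induction m with
  | zero =>
    intro i hm
    have hge : ¬ i < tokens.length := by omega
    have hd : tokens.drop i = [] := List.drop_eq_nil_of_le (by omega)
    rw [stateLoopB, dif_neg hge, hd]
    simp [unwrapLoopA]
  | succ m ih =>
    intro i hm
    by_cases hlt : i < tokens.length
    · have hdrop : tokens.drop i = tokens[i] :: tokens.drop (i + 1) :=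
        List.drop_eq_getElem_cons hlt
      rw [stateLoopB_none_lt tokens i i hlt]
      by_cases he : cmdName tokens[i] = "env"
      · rw [if_pos he, stateLoopB_env]
        have hshift := envLoopA_shift tokens i 1
        have hl1 := envLoopA_le (tokens.drop i) 1
        have hsub2 : envSubA (tokens.drop i) =
            if envLoopA tokens (i + 1) < tokens.length
            then tokens.drop (envLoopA tokens (i + 1)) else [] := by
          conv_lhs => rw [hdrop]
          simp only [envSubA]
          rw [← hdrop, if_neg (by simp [he]), hshift]
          by_cases hc : envLoopA (tokens.drop i) 1 < (tokens.drop i).length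
          · rw [if_pos hc, if_pos (by simp only [List.length_drop] at hc; omega),
                List.drop_drop]
          · rw [if_neg hc, if_neg (by simp only [List.length_drop] at hc; omega)]
        by_cases hin : envLoopA tokens (i + 1) < tokens.length
        · rw [if_pos hin]
          have hnn : envSubA (tokens.drop i) ≠ [] := by
            rw [hsub2, if_pos hin]
            intro hc
            have := List.drop_eq_nil_iff.mp hc
            omega
          conv_rhs => rw [hdrop, unwrapLoopA_cons, ← hdrop]
          rw [if_pos he, if_neg hnn, hsub2, if_pos hin,
              stateLoopB_none_indep tokens _ i (envLoopA tokens (i + 1)) hin]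
          exact ih (envLoopA tokens (i + 1)) (by omega)
        · rw [if_neg hin]
          have hnil : envSubA (tokens.drop i) = [] := by rw [hsub2, if_neg hin]
          conv_rhs => rw [hdrop, unwrapLoopA_cons, ← hdrop]
          rw [if_pos he, if_pos hnil]
      · by_cases hs : cmdName tokens[i] = "sudo"
        · rw [if_neg he, if_pos hs, stateLoopB_sudo]
          have hshift := sudoLoopA_shift tokens i 1
          have hl1 := sudoLoopA_le (tokens.drop i) 1
          have hsub2 : sudoSubA (tokens.drop i) =
              if sudoLoopA tokens (i + 1) < tokens.length
              then tokens.drop (sudoLoopA tokens (i + 1)) else [] := by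
            conv_lhs => rw [hdrop]
            simp only [sudoSubA]
            rw [← hdrop, if_neg (by simp [hs]), hshift]
            by_cases hc : sudoLoopA (tokens.drop i) 1 < (tokens.drop i).length
            · rw [if_pos hc, if_pos (by simp only [List.length_drop] at hc; omega),
                  List.drop_drop]
            · rw [if_neg hc, if_neg (by simp only [List.length_drop] at hc; omega)]
          by_cases hin : sudoLoopA tokens (i + 1) < tokens.length
          · rw [if_pos hin]
            have hnn : sudoSubA (tokens.drop i) ≠ [] := by
              rw [hsub2, if_pos hin]
              intro hc
              have := List.drop_eq_nil_iff.mp hc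
              omega
            conv_rhs => rw [hdrop, unwrapLoopA_cons, ← hdrop]
            rw [if_neg (by simp [he]), if_pos hs, if_neg hnn, hsub2, if_pos hin,
                stateLoopB_none_indep tokens _ i (sudoLoopA tokens (i + 1)) hin]
            exact ih (sudoLoopA tokens (i + 1)) (by omega)
          · rw [if_neg hin]
            have hnil : sudoSubA (tokens.drop i) = [] := by rw [hsub2, if_neg hin]
            conv_rhs => rw [hdrop, unwrapLoopA_cons, ← hdrop]
            rw [if_neg (by simp [he]), if_pos hs, if_pos hnil]
        · rw [if_neg he, if_neg hs]
          conv_rhs => rw [hdrop, unwrapLoopA_cons, ← hdrop]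
          rw [if_neg (by simp [he]), if_neg (by simp [hs])]
    · have hd : tokens.drop i = [] := List.drop_eq_nil_of_le (by omega)
      rw [stateLoopB, dif_neg hlt, hd]
      simp [unwrapLoopA]

-- ===== VERDICT (by name: the statement is the Claim_ definition above) =====
theorem unwrap_prefixed_command_py_spec : Claim_equal_unwrap_prefixed_command_py := by
  intro parts _
  unfold Spec_unwrap_prefixed_command_py unwrap_prefixed_command_py unwrap_prefixed_command_py_alt
  rw [stateLoopB_main (parts.getD []) (parts.getD []).length 0 (by omega)]
  simp
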